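-- pv_equiv track=rewrite | github.com/Aadityasamriya/HFAPI | bot/core/model_caller.py | _suggest_perspective
-- ===== SOURCE A (Python) =====
-- def _suggest_perspective(prompt: str) -> str:
--     """Suggest camera perspective"""
--     if any(word in prompt.lower() for word in ['portrait', 'person', 'face']):
--         return 'Eye-level portrait perspective'
--     elif any(word in prompt.lower() for word in ['landscape', 'wide', 'panoramic']):
--         return 'Wide-angle landscape perspective'
--     elif any(word in prompt.lower() for word in ['close', 'detail', 'macro']):
--         return 'Close-up detailed perspective'
--     else:
--         return 'Standard viewing angle with good depth'
-- ===== SOURCE B (Python) =====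
-- _KEYWORD_RANKS = [
--     ('portrait', 0), ('person', 0), ('face', 0),
--     ('landscape', 1), ('wide', 1), ('panoramic', 1),
--     ('close', 2), ('detail', 2), ('macro', 2),
-- ]
--
-- _LABELS = [
--     'Eye-level portrait perspective',
--     'Wide-angle landscape perspective',
--     'Close-up detailed perspective',
--     'Standard viewing angle with good depth',
-- ]
--
-- def _suggest_perspective(prompt: str) -> str:
--     """Suggest camera perspective: one left-to-right scan of the lowered prompt,
--     matching all keywords at each position and keeping the best (lowest) category rank."""
--     s = prompt.lower()
--     best = 3
--     for i in range(len(s)):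
--         for word, rank in _KEYWORD_RANKS:
--             if rank < best and s.startswith(word, i):
--                 best = rank
--     return _LABELS[best]
-- ===== Notes on version B (the rewrite author's own statement) =====
-- stated objective: alternative
-- what changed: Replaces the per-keyword substring-containment branch chain with a single left-to-right positional scan of the lowered prompt (a naive multi-pattern matcher) that keeps a best-rank accumulator and indexes a label table at the end.
import Mathlib
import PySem

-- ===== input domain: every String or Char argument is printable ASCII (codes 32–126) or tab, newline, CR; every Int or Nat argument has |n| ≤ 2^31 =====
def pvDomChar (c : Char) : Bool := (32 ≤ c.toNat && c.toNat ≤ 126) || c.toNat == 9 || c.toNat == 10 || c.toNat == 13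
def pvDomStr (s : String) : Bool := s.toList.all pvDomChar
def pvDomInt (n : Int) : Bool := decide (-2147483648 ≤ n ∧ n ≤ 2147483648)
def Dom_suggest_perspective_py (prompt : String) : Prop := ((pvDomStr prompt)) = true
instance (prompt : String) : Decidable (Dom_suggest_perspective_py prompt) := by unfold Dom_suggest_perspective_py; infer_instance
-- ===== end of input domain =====

-- B replaces A's per-keyword containment branch chain with a single positional scan
-- keeping a best-rank accumulator (alternative decomposition, same cost).

-- ===== PORT A =====
def suggest_perspective_py (prompt : String) : String :=
  if ["portrait", "person", "face"].any (fun word => PySem.Str.isIn word (PySem.Str.lower prompt)) then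
    "Eye-level portrait perspective"
  else if ["landscape", "wide", "panoramic"].any (fun word => PySem.Str.isIn word (PySem.Str.lower prompt)) then
    "Wide-angle landscape perspective"
  else if ["close", "detail", "macro"].any (fun word => PySem.Str.isIn word (PySem.Str.lower prompt)) then
    "Close-up detailed perspective"
  else
    "Standard viewing angle with good depth"

-- ===== PORT B =====
-- the (keyword, rank) table of Source B, keywords as char lists
def pvKwRanks : List (List Char × Nat) :=
  [ ("portrait".toList, 0), ("person".toList, 0), ("face".toList, 0),
    ("landscape".toList, 1), ("wide".toList, 1), ("panoramic".toList, 1),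
    ("close".toList, 2), ("detail".toList, 2), ("macro".toList, 2) ]

def pvLabels : List String :=
  [ "Eye-level portrait perspective",
    "Wide-angle landscape perspective",
    "Close-up detailed perspective",
    "Standard viewing angle with good depth" ]

-- the inner 'for word, rank in _KEYWORD_RANKS' loop at one position (suffix s)
def pvInner (s : List Char) (best : Nat) : Nat :=
  pvKwRanks.foldl (fun b wr => if decide (wr.2 < b) && wr.1.isPrefixOf s then wr.2 else b) best

-- the outer 'for i in range(len(s))' loop: positions i = each nonempty suffix
def pvScan : List Char → Nat → Nat
  | [], best => best
  | c :: rest, best => pvScan rest (pvInner (c :: rest) best)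

def suggest_perspective_py_alt (prompt : String) : String :=
  pvLabels.getD (pvScan (PySem.Str.lower prompt).toList 3) ""

-- ===== PRECONDITION & SPEC =====
def Spec_suggest_perspective_py (prompt : String) (out : String) : Prop := out = suggest_perspective_py_alt prompt
instance (prompt : String) (out : String) : Decidable (Spec_suggest_perspective_py prompt out) := by unfold Spec_suggest_perspective_py; infer_instance

-- ===== CLAIM (what is proved, stated in full; the proofs are below) =====
def Claim_equal_suggest_perspective_py : Prop := ∀ (prompt : String), Dom_suggest_perspective_py prompt → Spec_suggest_perspective_py prompt (suggest_perspective_py prompt)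

-- ===== LEMMAS AND PROOFS =====

-- rank chain over prefix matches at the head position
def pvPrefChain (s : List Char) : Nat :=
  if ("portrait".toList.isPrefixOf s || "person".toList.isPrefixOf s || "face".toList.isPrefixOf s) then 0
  else if ("landscape".toList.isPrefixOf s || "wide".toList.isPrefixOf s || "panoramic".toList.isPrefixOf s) then 1
  else if ("close".toList.isPrefixOf s || "detail".toList.isPrefixOf s || "macro".toList.isPrefixOf s) then 2
  else 3

-- rank chain over infix (substring) matches anywhere
def pvInfChain (s : List Char) : Nat :=
  if (decide ("portrait".toList <:+: s) || decide ("person".toList <:+: s) || decide ("face".toList <:+: s)) then 0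
  else if (decide ("landscape".toList <:+: s) || decide ("wide".toList <:+: s) || decide ("panoramic".toList <:+: s)) then 1
  else if (decide ("close".toList <:+: s) || decide ("detail".toList <:+: s) || decide ("macro".toList <:+: s)) then 2
  else 3

lemma pvStep (acc r : Nat) (p : Bool) :
    (if decide (r < acc) && p then r else acc) = if p then min acc r else acc := by
  cases p <;> simp <;> split <;> omega

-- three steps with the same rank collapse to one guarded min
lemma pvGroup (acc r : Nat) (p1 p2 p3 : Bool) :
    (if p3 then min (if p2 then min (if p1 then min acc r else acc) r
                     else if p1 then min acc r else acc) r
            else if p2 then min (if p1 then min acc r else acc) r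
                 else if p1 then min acc r else acc) =
    if p1 || p2 || p3 then min acc r else acc := by
  cases p1 <;> cases p2 <;> cases p3 <;> simp

-- the guarded-min chain for ranks 0,1,2 is min with the priority chain
lemma pvGroupChain (b : Nat) (hb : b ≤ 3) (q0 q1 q2 : Bool) :
    (if q2 then min (if q1 then min (if q0 then min b 0 else b) 1
                     else if q0 then min b 0 else b) 2
            else if q1 then min (if q0 then min b 0 else b) 1
                 else if q0 then min b 0 else b) =
    min b (if q0 then 0 else if q1 then 1 else if q2 then 2 else 3) := by
  cases q0 <;> cases q1 <;> cases q2 <;> simp <;> omega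

lemma pvInner_eq (s : List Char) (b : Nat) (hb : b ≤ 3) :
    pvInner s b = min b (pvPrefChain s) := by
  unfold pvInner pvKwRanks pvPrefChain
  simp only [List.foldl, pvStep]
  rw [pvGroup, pvGroup, pvGroup, pvGroupChain b hb]

lemma pvInfChain_le (s : List Char) : pvInfChain s ≤ 3 := by
  unfold pvInfChain; split_ifs <;> omega

-- one keyword: infix of c::t = prefix at head or infix of tail (as Bool)
lemma pvInfKw (w : List Char) (c : Char) (t : List Char) :
    decide (w <:+: c :: t) = (w.isPrefixOf (c :: t) || decide (w <:+: t)) := by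
  by_cases h1 : w <+: c :: t <;> by_cases h2 : w <:+: t <;>
    simp [List.infix_cons_iff, List.isPrefixOf_iff_prefix, h1, h2, Bool.eq_false_iff]

lemma pvOrShuffle (a b c d e f : Bool) :
    (((a || b) || (c || d)) || (e || f)) = (((a || c) || e) || ((b || d) || f)) := by
  cases a <;> cases b <;> cases c <;> cases d <;> cases e <;> cases f <;> decide

lemma pvChain_min (x0 x1 x2 y0 y1 y2 : Bool) :
    (if x0 || y0 then 0 else if x1 || y1 then 1 else if x2 || y2 then 2 else 3) =
    min (if x0 then 0 else if x1 then 1 else if x2 then 2 else 3)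
        (if y0 then (0:Nat) else if y1 then 1 else if y2 then 2 else 3) := by
  cases x0 <;> cases x1 <;> cases x2 <;> cases y0 <;> cases y1 <;> cases y2 <;> decide

lemma pvInf_cons (c : Char) (t : List Char) :
    pvInfChain (c :: t) = min (pvPrefChain (c :: t)) (pvInfChain t) := by
  unfold pvInfChain pvPrefChain
  simp only [pvInfKw]
  rw [pvOrShuffle, pvOrShuffle, pvOrShuffle]
  exact pvChain_min _ _ _ _ _ _

lemma pvScan_eq (s : List Char) : ∀ b : Nat, b ≤ 3 → pvScan s b = min b (pvInfChain s) := by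
  induction s with
  | nil => intro b hb
           have h : pvInfChain [] = 3 := by decide
           simp [pvScan, h]; omega
  | cons c t ih =>
      intro b hb
      have h1 : pvInner (c :: t) b ≤ 3 := by
        rw [pvInner_eq _ _ hb]; omega
      calc pvScan (c :: t) b = pvScan t (pvInner (c :: t) b) := rfl
        _ = min (pvInner (c :: t) b) (pvInfChain t) := ih _ h1
        _ = min (min b (pvPrefChain (c :: t))) (pvInfChain t) := by rw [pvInner_eq _ _ hb]
        _ = min b (pvInfChain (c :: t)) := by rw [pvInf_cons]; omega

-- ===== VERDICT (by name: the statement is the Claim_ definition above) =====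
theorem suggest_perspective_py_spec : Claim_equal_suggest_perspective_py := by
  intro prompt _
  unfold Spec_suggest_perspective_py suggest_perspective_py suggest_perspective_py_alt
  rw [pvScan_eq _ 3 (by omega)]
  have hmin : min 3 (pvInfChain (PySem.Str.lower prompt).toList) = pvInfChain (PySem.Str.lower prompt).toList := by
    have := pvInfChain_le (PySem.Str.lower prompt).toList; omega
  rw [hmin]
  simp only [List.any_cons, List.any_nil, Bool.or_false]
  have hisIn : ∀ w : String, PySem.Str.isIn w (PySem.Str.lower prompt) =
      decide (w.toList <:+: (PySem.Str.lower prompt).toList) := by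
    intro w
    by_cases hc : w.toList <:+: (PySem.Str.lower prompt).toList
    · rw [decide_eq_true hc]
      exact (PySem.Str.isIn_iff_infix w (PySem.Str.lower prompt)).mpr hc
    · rw [decide_eq_false hc, ← Bool.not_eq_true, PySem.Str.isIn_iff_infix]
      exact hc
  rw [hisIn, hisIn, hisIn, hisIn, hisIn, hisIn, hisIn, hisIn, hisIn]
  unfold pvInfChain
  split_ifs <;> simp_all [pvLabels]
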